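-- pv_equiv track=rewrite | github.com/Rayan-Allali/DDI_extraction_api | utils/re_embedding.py | get_entity_marker_word_ids
-- ===== SOURCE A (Python) =====
-- def get_entity_marker_word_ids(tokens, word_ids):
--     e1_word_id = e2_word_id = e1_end_word_id = e2_end_word_id = None
--
--     for token, word_id in zip(tokens, word_ids):
--         if token == '[e1]':
--             e1_word_id = word_id
--         elif token == '[e2]':
--             e2_word_id = word_id
--         elif token == '[/e1]':
--             e1_end_word_id = word_id
--         elif token == '[/e2]':
--             e2_end_word_id = word_id
--
--     return e1_word_id, e1_end_word_id, e2_word_id, e2_end_word_id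
-- ===== SOURCE B (Python) =====
-- def get_entity_marker_word_ids(tokens, word_ids):
--     e1 = e1_end = e2 = e2_end = None
--     f1 = f1e = f2 = f2e = False
--     for token, word_id in reversed(list(zip(tokens, word_ids))):
--         if f1 and f1e and f2 and f2e:
--             break
--         if token == '[e1]' and not f1:
--             e1, f1 = word_id, True
--         elif token == '[/e1]' and not f1e:
--             e1_end, f1e = word_id, True
--         elif token == '[e2]' and not f2:
--             e2, f2 = word_id, True
--         elif token == '[/e2]' and not f2e:
--             e2_end, f2e = word_id, True
--     return e1, e1_end, e2, e2_end
-- ===== Notes on version B (the rewrite author's own statement) =====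
-- stated objective: alternative
-- what changed: B scans the zipped pairs in reverse, taking the FIRST occurrence of each marker (= A's last) with found-flags and an early break once all four markers are seen, instead of A's full forward pass with overwriting.
import Mathlib
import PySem

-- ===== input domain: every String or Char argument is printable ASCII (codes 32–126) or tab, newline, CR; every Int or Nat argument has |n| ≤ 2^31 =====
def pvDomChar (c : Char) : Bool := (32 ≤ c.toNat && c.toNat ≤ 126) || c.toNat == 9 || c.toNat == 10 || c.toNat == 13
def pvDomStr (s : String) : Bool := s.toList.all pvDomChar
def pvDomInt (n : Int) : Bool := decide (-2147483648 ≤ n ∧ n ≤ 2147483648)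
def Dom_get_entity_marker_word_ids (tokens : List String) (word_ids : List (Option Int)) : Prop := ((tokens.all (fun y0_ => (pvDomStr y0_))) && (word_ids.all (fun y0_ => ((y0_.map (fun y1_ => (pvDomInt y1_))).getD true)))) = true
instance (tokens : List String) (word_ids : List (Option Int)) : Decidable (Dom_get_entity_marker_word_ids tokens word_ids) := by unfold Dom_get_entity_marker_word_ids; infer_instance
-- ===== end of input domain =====

-- B scans the zipped pairs in reverse with found-flags and an early break (first match from the
-- end = A's last match), instead of A's full forward pass with overwriting. Same cost class.

-- ===== PORT A =====
-- forward fold over zip, state (e1, e2, e1_end, e2_end), branches in A's order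
def pvStepA (s : Option Int × Option Int × Option Int × Option Int) (p : String × Option Int) :
    Option Int × Option Int × Option Int × Option Int :=
  if p.1 == "[e1]" then (p.2, s.2.1, s.2.2.1, s.2.2.2)
  else if p.1 == "[e2]" then (s.1, p.2, s.2.2.1, s.2.2.2)
  else if p.1 == "[/e1]" then (s.1, s.2.1, p.2, s.2.2.2)
  else if p.1 == "[/e2]" then (s.1, s.2.1, s.2.2.1, p.2)
  else s

def get_entity_marker_word_ids (tokens : List String) (word_ids : List (Option Int)) : Option Int × Option Int × Option Int × Option Int :=
  let s := (tokens.zip word_ids).foldl pvStepA (none, none, none, none)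
  (s.1, s.2.2.1, s.2.1, s.2.2.2)

-- ===== PORT B =====
-- recursion over the reversed zip list; flags fi = marker already recorded; break when all set
def pvGoB : List (String × Option Int) → Option Int → Option Int → Option Int → Option Int →
    Bool → Bool → Bool → Bool → Option Int × Option Int × Option Int × Option Int
  | [], e1, e1e, e2, e2e, _, _, _, _ => (e1, e1e, e2, e2e)
  | (t, w) :: rest, e1, e1e, e2, e2e, f1, f1e, f2, f2e =>
    if f1 && f1e && f2 && f2e then (e1, e1e, e2, e2e)
    else if t == "[e1]" && !f1 then pvGoB rest w e1e e2 e2e true f1e f2 f2e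
    else if t == "[/e1]" && !f1e then pvGoB rest e1 w e2 e2e f1 true f2 f2e
    else if t == "[e2]" && !f2 then pvGoB rest e1 e1e w e2e f1 f1e true f2e
    else if t == "[/e2]" && !f2e then pvGoB rest e1 e1e e2 w f1 f1e f2 true
    else pvGoB rest e1 e1e e2 e2e f1 f1e f2 f2e

def get_entity_marker_word_ids_alt (tokens : List String) (word_ids : List (Option Int)) : Option Int × Option Int × Option Int × Option Int :=
  pvGoB (tokens.zip word_ids).reverse none none none none false false false false

-- ===== PRECONDITION & SPEC =====
def Spec_get_entity_marker_word_ids (tokens : List String) (word_ids : List (Option Int)) (out : Option Int × Option Int × Option Int × Option Int) : Prop := out = get_entity_marker_word_ids_alt tokens word_ids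
instance (tokens : List String) (word_ids : List (Option Int)) (out : Option Int × Option Int × Option Int × Option Int) : Decidable (Spec_get_entity_marker_word_ids tokens word_ids out) := by unfold Spec_get_entity_marker_word_ids; infer_instance

-- ===== CLAIM (what is proved, stated in full; the proofs are below) =====
def Claim_equal_get_entity_marker_word_ids : Prop := ∀ (tokens : List String) (word_ids : List (Option Int)), Dom_get_entity_marker_word_ids tokens word_ids → Spec_get_entity_marker_word_ids tokens word_ids (get_entity_marker_word_ids tokens word_ids)

-- ===== LEMMAS AND PROOFS =====

-- last occurrence of marker m in l, default d (what A's fold computes componentwise)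
def pvLast (m : String) (l : List (String × Option Int)) (d : Option Int) : Option Int :=
  l.foldl (fun acc p => if p.1 == m then p.2 else acc) d

-- first occurrence of marker m in l, default d (what B computes, over the reversed list)
def pvFirst (m : String) : List (String × Option Int) → Option Int → Option Int
  | [], d => d
  | (t, w) :: rest, d => if t == m then w else pvFirst m rest d

theorem pvFoldA_eq (l : List (String × Option Int)) (s : Option Int × Option Int × Option Int × Option Int) :
    l.foldl pvStepA s = (pvLast "[e1]" l s.1, pvLast "[e2]" l s.2.1, pvLast "[/e1]" l s.2.2.1, pvLast "[/e2]" l s.2.2.2) := by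
  induction l generalizing s with
  | nil => simp [pvLast]
  | cons p rest ih =>
    obtain ⟨t, w⟩ := p
    simp only [List.foldl_cons, pvLast, pvStepA, ih]
    split_ifs with h1 h2 h3 h4 <;> simp_all [pvLast]

theorem pvFirst_append (m : String) (a b : List (String × Option Int)) (d : Option Int) :
    pvFirst m (a ++ b) d = pvFirst m a (pvFirst m b d) := by
  induction a with
  | nil => simp [pvFirst]
  | cons p rest ih => obtain ⟨t, w⟩ := p; simp [pvFirst, ih]

theorem pvFirst_reverse (m : String) (l : List (String × Option Int)) (d : Option Int) :
    pvFirst m l.reverse d = pvLast m l d := by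
  induction l generalizing d with
  | nil => simp [pvFirst, pvLast]
  | cons p rest ih =>
    obtain ⟨t, w⟩ := p
    simp [pvLast, List.reverse_cons, pvFirst_append, pvFirst, ih]

theorem pvGoB_eq (r : List (String × Option Int)) (e1 e1e e2 e2e : Option Int) (f1 f1e f2 f2e : Bool) :
    pvGoB r e1 e1e e2 e2e f1 f1e f2 f2e =
      ((if f1 then e1 else pvFirst "[e1]" r e1),
       (if f1e then e1e else pvFirst "[/e1]" r e1e),
       (if f2 then e2 else pvFirst "[e2]" r e2),
       (if f2e then e2e else pvFirst "[/e2]" r e2e)) := by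
  induction r generalizing e1 e1e e2 e2e f1 f1e f2 f2e with
  | nil => cases f1 <;> cases f1e <;> cases f2 <;> cases f2e <;> simp [pvGoB, pvFirst]
  | cons p rest ih =>
    obtain ⟨t, w⟩ := p
    simp only [pvGoB]
    split_ifs with hb h1 h2 h3 h4 <;>
      simp_all [pvFirst]

-- ===== VERDICT (by name: the statement is the Claim_ definition above) =====
theorem get_entity_marker_word_ids_spec : Claim_equal_get_entity_marker_word_ids := by
  intro tokens word_ids _
  unfold Spec_get_entity_marker_word_ids get_entity_marker_word_ids get_entity_marker_word_ids_alt
  simp [pvFoldA_eq, pvGoB_eq, pvFirst_reverse]
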